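-- pv_equiv track=rewrite | github.com/Paladinking/Scripts | workdir/language.py | find_rule_end
-- ===== SOURCE A (Python) =====
-- def find_rule_end(s: str) -> int:
--     ix = 0
--     while ix < len(s):
--         if s[ix] == ';':
--             return ix
--         if s[ix] == '\'':
--             ix += 1
--             while ix < len(s) and s[ix] != '\'':
--                 ix += 1
--         ix += 1
--     return len(s)
-- ===== SOURCE B (Python) =====
-- def find_rule_end(s: str) -> int:
--     semi = s.find(';')
--     q = s.find("'")
--     if q == -1 or (semi != -1 and semi < q):
--         return semi if semi != -1 else len(s)
--     rest = s[q + 1:]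
--     close = rest.find("'")
--     if close == -1:
--         return len(s)
--     skip = q + 1 + close + 1
--     return skip + find_rule_end(s[skip:])
-- ===== Notes on version B (the rewrite author's own statement) =====
-- stated objective: alternative
-- what changed: B replaces A's character-by-character index walk with a delimiter-jumping recursion built on str.find and slicing: it locates the first ';' and first quote, answers directly when no quote interferes, otherwise finds the closing quote and recurses on the remainder of the string after the quoted section.
import Mathlib
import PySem

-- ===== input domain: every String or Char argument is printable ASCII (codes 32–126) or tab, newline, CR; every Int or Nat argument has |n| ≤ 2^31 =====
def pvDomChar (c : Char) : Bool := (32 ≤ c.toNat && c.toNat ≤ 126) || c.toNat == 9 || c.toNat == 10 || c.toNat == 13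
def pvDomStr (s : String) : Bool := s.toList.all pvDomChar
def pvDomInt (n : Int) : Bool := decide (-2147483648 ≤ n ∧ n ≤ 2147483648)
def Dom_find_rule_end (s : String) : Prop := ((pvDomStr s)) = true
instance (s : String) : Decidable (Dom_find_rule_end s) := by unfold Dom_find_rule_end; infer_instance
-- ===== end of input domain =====

-- B replaces A's character-by-character scan with a delimiter-jumping recursion on str.find and slices (alternative decomposition; same asymptotic cost).

-- ===== PORT A =====
-- A's inner `while ix < len(s) and s[ix] != '\'': ix += 1`; returns the final ix.
def pvInnerA (s : List Char) (ix : Nat) : Nat :=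
  if h : ix < s.length then
    if s[ix] ≠ '\'' then pvInnerA s (ix + 1) else ix
  else ix
termination_by s.length - ix

-- (used by pvOuterA's decreasing_by)
theorem pvInnerA_ge (s : List Char) (ix : Nat) : ix ≤ pvInnerA s ix := by
  unfold pvInnerA
  split
  · split
    · exact le_trans (Nat.le_succ ix) (pvInnerA_ge s (ix + 1))
    · exact le_refl ix
  · exact le_refl ix
termination_by s.length - ix

-- A's outer while loop over index ix.
def pvOuterA (s : List Char) (ix : Nat) : Nat :=
  if h : ix < s.length then
    if s[ix] = ';' then ix
    else if s[ix] = '\'' then pvOuterA s (pvInnerA s (ix + 1) + 1)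
    else pvOuterA s (ix + 1)
  else s.length
termination_by s.length - ix
decreasing_by
  · have := pvInnerA_ge s (ix + 1); omega
  · omega

def find_rule_end (s : String) : Int := (pvOuterA s.toList 0 : Int)

-- ===== PORT B =====
-- (used by pvFindB's decreasing_by) single-char `a in cs` vs find = -1
theorem pvFind_char_neg (cs : List Char) (a : Char) :
    PySem.Chars.find cs [a] = -1 ↔ a ∉ cs := by
  rw [PySem.Chars.find_eq_neg_one_iff]
  constructor
  · intro h hm
    obtain ⟨l1, l2, rfl⟩ := List.append_of_mem hm
    exact h ⟨l1, l2, by simp⟩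
  · intro h ⟨l1, l2, he⟩
    exact h (by rw [← he]; simp)

-- B's recursion: jump to the first ';' / first quote via find, slice off the quoted section, recurse.
def pvFindB (cs : List Char) : Nat :=
  let semi := PySem.Chars.find cs [';']
  let q := PySem.Chars.find cs ['\'']
  if q = -1 ∨ (semi ≠ -1 ∧ semi < q) then
    if semi ≠ -1 then semi.toNat else cs.length
  else
    let rest := PySem.List.slice cs (some (q + 1)) none
    let close := PySem.Chars.find rest ['\'']
    if close = -1 then cs.length
    else
      let skip := q.toNat + 1 + close.toNat + 1
      skip + pvFindB (PySem.List.slice cs (some (skip : Int)) none)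
termination_by cs.length
decreasing_by
  rename_i hq _
  have hmem : '\'' ∈ cs := by
    by_contra hc
    exact hq (Or.inl ((pvFind_char_neg cs '\'').mpr hc))
  have hpos : 0 < cs.length := List.length_pos_of_mem hmem
  rw [PySem.List.slice_from_natCast]
  simp only [List.length_drop]
  omega

def find_rule_end_alt (s : String) : Int := (pvFindB s.toList : Int)

-- ===== PRECONDITION & SPEC =====
def Spec_find_rule_end (s : String) (out : Int) : Prop := out = find_rule_end_alt s
instance (s : String) (out : Int) : Decidable (Spec_find_rule_end s out) := by unfold Spec_find_rule_end; infer_instance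

-- ===== CLAIM (what is proved, stated in full; the proofs are below) =====
def Claim_equal_find_rule_end : Prop := ∀ (s : String), Dom_find_rule_end s → Spec_find_rule_end s (find_rule_end s)

-- ===== LEMMAS AND PROOFS =====

-- Reference machine: pvM cs inq = number of characters consumed before the answer
-- (index of the returned position, or cs.length), starting in quote state inq.
def pvM : List Char → Bool → Nat
  | [], _ => 0
  | c :: rest, true => 1 + pvM rest (if c = '\'' then false else true)
  | c :: rest, false =>
    if c = ';' then 0
    else if c = '\'' then 1 + pvM rest true
    else 1 + pvM rest false

-- A = pvM ------------------------------------------------------------------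

theorem pvInnerA_stop (s : List Char) (ix : Nat) (h : ¬ ix < s.length) :
    pvInnerA s ix = ix := by
  rw [pvInnerA]; simp [h]

theorem pvAM (s : List Char) (ix : Nat) (hle : ix ≤ s.length) :
    ix + pvM (s.drop ix) false = pvOuterA s ix ∧
    ix + pvM (s.drop ix) true = pvOuterA s (pvInnerA s ix + 1) := by
  by_cases h : ix < s.length
  · have hdrop : s.drop ix = s[ix] :: s.drop (ix + 1) := List.drop_eq_getElem_cons h
    have ih := pvAM s (ix + 1) h
    constructor
    · rw [hdrop, pvOuterA]
      by_cases hs : s[ix] = ';'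
      · simp [pvM, h, hs]
      · by_cases hq : s[ix] = '\''
        · simp [pvM, h, hq, ← ih.2]; omega
        · simp [pvM, h, hs, hq, ← ih.1]; omega
    · rw [hdrop]
      by_cases hq : s[ix] = '\''
      · rw [pvInnerA]
        simp only [h, dif_pos, hq]
        simp [pvM, ← ih.1]; omega
      · rw [pvInnerA]
        simp only [h, dif_pos]
        simp only [ne_eq, hq, not_false_eq_true, if_pos]
        simp [pvM, hq, ← ih.2]; omega
  · have hix : ix = s.length := le_antisymm hle (not_lt.mp h)
    have hdrop : s.drop ix = [] := by rw [hix, List.drop_length]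
    have h1 : ¬ ix + 1 < s.length := by omega
    constructor
    · rw [hdrop, pvOuterA]; simp [pvM, h, hix]
    · rw [hdrop, pvInnerA_stop s ix h, pvOuterA]
      simp [pvM, h1, hix]
termination_by s.length - ix

-- pvM facts ----------------------------------------------------------------

theorem pvM_append_false (u v : List Char) (hu : ∀ c ∈ u, c ≠ ';' ∧ c ≠ '\'') :
    pvM (u ++ v) false = u.length + pvM v false := by
  induction u with
  | nil => simp
  | cons c rest ih =>
    have hc := hu c (by simp)
    simp [pvM, hc.1, hc.2, ih (fun x hx => hu x (by simp [hx]))]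
    omega

theorem pvM_append_true (u v : List Char) (hu : ∀ c ∈ u, c ≠ '\'') :
    pvM (u ++ v) true = u.length + pvM v true := by
  induction u with
  | nil => simp
  | cons c rest ih =>
    have hc := hu c (by simp)
    simp [pvM, hc, ih (fun x hx => hu x (by simp [hx]))]
    omega

theorem pvM_true_all (u : List Char) (hu : ∀ c ∈ u, c ≠ '\'') :
    pvM u true = u.length := by
  have := pvM_append_true u [] hu
  simp [pvM] at this
  exact this

theorem pvM_semi_block (u d : List Char) (hu : ∀ c ∈ u, c ≠ ';' ∧ c ≠ '\'') :
    pvM (u ++ ';' :: d) false = u.length := by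
  rw [pvM_append_false u _ hu]
  simp [pvM]

theorem pvM_quote_block (u d : List Char) (hu : ∀ c ∈ u, c ≠ ';' ∧ c ≠ '\'') :
    pvM (u ++ '\'' :: d) false = u.length + 1 + pvM d true := by
  rw [pvM_append_false u _ hu]
  simp [pvM]
  omega

theorem pvM_close_block (v e : List Char) (hv : ∀ c ∈ v, c ≠ '\'') :
    pvM (v ++ '\'' :: e) true = v.length + 1 + pvM e false := by
  rw [pvM_append_true v _ hv]
  simp [pvM]
  omega

-- find facts ---------------------------------------------------------------

theorem pvFind_char_pos (cs : List Char) (a : Char)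
    (h : PySem.Chars.find cs [a] ≠ -1) :
    (PySem.Chars.find cs [a]).toNat < cs.length ∧
    cs = cs.take (PySem.Chars.find cs [a]).toNat ++ a :: cs.drop ((PySem.Chars.find cs [a]).toNat + 1) ∧
    (∀ c ∈ cs.take (PySem.Chars.find cs [a]).toNat, c ≠ a) := by
  have h0 : 0 ≤ PySem.Chars.find cs [a] := by
    have := PySem.Chars.neg_one_le_find cs [a]
    omega
  obtain ⟨hpre, hmin⟩ := PySem.Chars.find_spec (s := cs) (sub := [a]) h0
  set k := (PySem.Chars.find cs [a]).toNat with hk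
  obtain ⟨t, ht⟩ := hpre
  simp only [List.singleton_append] at ht
  have hlt : k < cs.length := by
    by_contra hc
    rw [List.drop_eq_nil_of_le (by omega)] at ht
    simp at ht
  have h2 : cs.drop (k + 1) = t := by
    rw [← List.tail_drop, ← ht]
    rfl
  have hget : cs.drop k = a :: cs.drop (k + 1) := by
    rw [← ht, h2]
  refine ⟨hlt, ?_, ?_⟩
  · conv_lhs => rw [← List.take_append_drop k cs]
    rw [hget]
  · intro c hc hca
    subst hca
    obtain ⟨i, hi, hgi⟩ := List.getElem_of_mem hc
    have hik : i < k := by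
      have := List.length_take_le k cs
      omega
    have hil : i < cs.length := by omega
    have hci : cs[i] = c := by
      rw [← hgi]
      simp [List.getElem_take]
    exact hmin i hik ⟨cs.drop (i + 1), by
      simp only [List.singleton_append]
      rw [List.drop_eq_getElem_cons hil, hci]⟩

-- B = pvM ------------------------------------------------------------------

theorem pvBM (cs : List Char) : pvFindB cs = pvM cs false := by
  rw [pvFindB]
  simp only []
  by_cases hcond : PySem.Chars.find cs ['\''] = -1 ∨
      (PySem.Chars.find cs [';'] ≠ -1 ∧ PySem.Chars.find cs [';'] < PySem.Chars.find cs ['\''])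
  · rw [if_pos hcond]
    by_cases hs : PySem.Chars.find cs [';'] ≠ -1
    · rw [if_pos hs]
      have h0 : 0 ≤ PySem.Chars.find cs [';'] := by
        have := PySem.Chars.neg_one_le_find cs [';']
        omega
      obtain ⟨hlt, hdec, hclean⟩ := pvFind_char_pos cs ';' hs
      have hnoq : ∀ c ∈ cs.take (PySem.Chars.find cs [';']).toNat, c ≠ '\'' := by
        rcases hcond with hn | ⟨_, hlt2⟩
        · intro c hc hca
          subst hca
          exact (pvFind_char_neg cs '\'').mp hn (List.mem_of_mem_take hc)
        · obtain ⟨_, _, hq_clean⟩ := pvFind_char_pos cs '\'' (by omega)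
          intro c hc
          apply hq_clean
          have h1 : cs.take (PySem.Chars.find cs [';']).toNat
              = (cs.take (PySem.Chars.find cs ['\'']).toNat).take (PySem.Chars.find cs [';']).toNat := by
            rw [List.take_take]
            congr 1
            omega
          rw [h1] at hc
          exact List.mem_of_mem_take hc
      have hR : pvM cs false = (PySem.Chars.find cs [';']).toNat := by
        conv_lhs => rw [hdec]
        rw [pvM_semi_block _ _ (fun c hc => ⟨hclean c hc, hnoq c hc⟩)]
        simp
        omega
      omega
    · rw [if_neg hs]
      push_neg at hs
      have hnos : ';' ∉ cs := (pvFind_char_neg cs ';').mp hs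
      have hnoq : '\'' ∉ cs := by
        rcases hcond with hn | ⟨hne, _⟩
        · exact (pvFind_char_neg cs '\'').mp hn
        · exact absurd hs hne
      have := pvM_append_false cs [] (fun c hc => ⟨fun h => hnos (h ▸ hc), fun h => hnoq (h ▸ hc)⟩)
      simp [pvM] at this
      omega
  · rw [if_neg hcond]
    push_neg at hcond
    obtain ⟨hqne, hsemi_cond⟩ := hcond
    obtain ⟨hqlt, hqdec, hqclean⟩ := pvFind_char_pos cs '\'' hqne
    have hq0 : 0 ≤ PySem.Chars.find cs ['\''] := by
      have := PySem.Chars.neg_one_le_find cs ['\'']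
      omega
    have hslice : PySem.List.slice cs (some (PySem.Chars.find cs ['\''] + 1)) none
        = cs.drop ((PySem.Chars.find cs ['\'']).toNat + 1) := by
      rw [PySem.List.slice_from cs (a := PySem.Chars.find cs ['\''] + 1) (by omega)]
      congr 1
      omega
    rw [hslice]
    -- no ';' before the opening quote
    have hnos : ∀ c ∈ cs.take (PySem.Chars.find cs ['\'']).toNat, c ≠ ';' := by
      intro c hc hca
      subst hca
      by_cases hsn : PySem.Chars.find cs [';'] = -1
      · exact (pvFind_char_neg cs ';').mp hsn (List.mem_of_mem_take hc)
      · have hle2 := hsemi_cond hsn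
        obtain ⟨_, _, hs_clean⟩ := pvFind_char_pos cs ';' hsn
        apply hs_clean ';' _ rfl
        have h1 : cs.take (PySem.Chars.find cs ['\'']).toNat
            = (cs.take (PySem.Chars.find cs [';']).toNat).take (PySem.Chars.find cs ['\'']).toNat := by
          rw [List.take_take]
          congr 1
          omega
        rw [h1] at hc
        exact List.mem_of_mem_take hc
    have hclean2 : ∀ c ∈ cs.take (PySem.Chars.find cs ['\'']).toNat, c ≠ ';' ∧ c ≠ '\'' :=
      fun c hc => ⟨hnos c hc, hqclean c hc⟩
    by_cases hclose : PySem.Chars.find (cs.drop ((PySem.Chars.find cs ['\'']).toNat + 1)) ['\''] = -1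
    · rw [if_pos hclose]
      have hnoq2 : '\'' ∉ cs.drop ((PySem.Chars.find cs ['\'']).toNat + 1) :=
        (pvFind_char_neg _ '\'').mp hclose
      have hR : pvM cs false = cs.length := by
        conv_lhs => rw [hqdec]
        rw [pvM_quote_block _ _ hclean2]
        rw [pvM_true_all _ (fun c hc h => hnoq2 (by rw [h] at hc; exact hc))]
        simp only [List.length_take, List.length_drop]
        omega
      omega
    · rw [if_neg hclose]
      obtain ⟨hclt, hcdec, hcclean⟩ := pvFind_char_pos (cs.drop ((PySem.Chars.find cs ['\'']).toNat + 1)) '\'' hclose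
      have hdd : (cs.drop ((PySem.Chars.find cs ['\'']).toNat + 1)).drop
            ((PySem.Chars.find (cs.drop ((PySem.Chars.find cs ['\'']).toNat + 1)) ['\'']).toNat + 1)
          = cs.drop ((PySem.Chars.find cs ['\'']).toNat + 1
              + (PySem.Chars.find (cs.drop ((PySem.Chars.find cs ['\'']).toNat + 1)) ['\'']).toNat + 1) := by
        rw [List.drop_drop]
        congr 1
      have hR : pvM cs false = (PySem.Chars.find cs ['\'']).toNat + 1
          + (PySem.Chars.find (cs.drop ((PySem.Chars.find cs ['\'']).toNat + 1)) ['\'']).toNat + 1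
          + pvM (cs.drop ((PySem.Chars.find cs ['\'']).toNat + 1
              + (PySem.Chars.find (cs.drop ((PySem.Chars.find cs ['\'']).toNat + 1)) ['\'']).toNat + 1)) false := by
        conv_lhs => rw [hqdec]
        rw [pvM_quote_block _ _ hclean2]
        conv_lhs => rw [hcdec]
        rw [pvM_close_block _ _ hcclean]
        rw [hdd]
        simp only [List.length_drop] at hclt
        simp only [List.length_take, List.length_drop]
        omega
      rw [PySem.List.slice_from_natCast]
      have ih := pvBM (cs.drop ((PySem.Chars.find cs ['\'']).toNat + 1
          + (PySem.Chars.find (cs.drop ((PySem.Chars.find cs ['\'']).toNat + 1)) ['\'']).toNat + 1))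
      rw [ih]
      rw [hR]
termination_by cs.length
decreasing_by
  simp only [List.length_drop]
  omega

-- ===== VERDICT (by name: the statement is the Claim_ definition above) =====
theorem find_rule_end_spec : Claim_equal_find_rule_end := by
  intro s _
  unfold Spec_find_rule_end find_rule_end find_rule_end_alt
  have hA := (pvAM s.toList 0 (Nat.zero_le _)).1
  simp at hA
  rw [← hA, pvBM]
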